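-- pv_equiv track=rewrite | github.com/mekhub/alphafold | alphafold/partition.py | initialize_any_intervening_cutpoint
-- ===== SOURCE A (Python) =====
-- def initialize_any_intervening_cutpoint( is_cutpoint ):
--     N = len( is_cutpoint )
--     any_intervening_cutpoint = [[]]*N
--     for i in range( N ): any_intervening_cutpoint[i] = [False]*N
--     for i in range( N ): #index of subfragment
--         found_cutpoint = False
--         any_intervening_cutpoint[ i ][ i ] = False
--         for offset in range( N ): #length of subfragment
--             j = (i + offset) % N;  # N cyclizes
--             any_intervening_cutpoint[ i ][ j ] = found_cutpoint
--             if is_cutpoint[ j ]: found_cutpoint = True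
--     return any_intervening_cutpoint
-- ===== SOURCE B (Python) =====
-- def initialize_any_intervening_cutpoint(is_cutpoint):
--     N = len(is_cutpoint)
--     P = [0]
--     for b in is_cutpoint + is_cutpoint:
--         P.append(P[-1] + (1 if b else 0))
--     out = []
--     for i in range(N):
--         row = [False] * N
--         for offset in range(N):
--             row[(i + offset) % N] = P[i + offset] - P[i] > 0
--         out.append(row)
--     return out
-- ===== Notes on version B (the rewrite author's own statement) =====
-- stated objective: alternative
-- what changed: Replaces A's carried running boolean per row with a prefix-count table over the doubled cutpoint list, so each cell is decided by subtracting two cumulative counts instead of threading loop state.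
import Mathlib
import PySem

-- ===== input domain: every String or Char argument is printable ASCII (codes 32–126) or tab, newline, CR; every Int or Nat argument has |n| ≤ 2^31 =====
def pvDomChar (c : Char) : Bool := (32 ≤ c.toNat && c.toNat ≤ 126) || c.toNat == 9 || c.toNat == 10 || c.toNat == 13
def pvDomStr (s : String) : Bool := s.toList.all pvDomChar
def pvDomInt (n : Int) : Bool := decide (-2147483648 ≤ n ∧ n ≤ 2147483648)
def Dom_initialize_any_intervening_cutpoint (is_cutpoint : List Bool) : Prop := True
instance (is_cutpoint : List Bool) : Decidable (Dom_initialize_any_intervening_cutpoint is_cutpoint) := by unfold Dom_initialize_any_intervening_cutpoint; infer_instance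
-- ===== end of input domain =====

-- B replaces A's per-row running boolean with a prefix-count table over the doubled
-- cutpoint list (cells decided by subtracting cumulative counts); alternative decomposition,
-- same asymptotic cost.

-- ===== PORT A =====
-- Literal transliteration of A: build N rows of [False]*N, then for each i thread a
-- running boolean over offsets, writing it at column (i+offset)%N. In-range Python
-- indexing/assignment ported via getD/set (exact on in-range indices).
def initialize_any_intervening_cutpoint (is_cutpoint : List Bool) : List (List Bool) :=
  let N := is_cutpoint.length
  let m0 : List (List Bool) := List.replicate N ([] : List Bool)
  let m1 := (List.range N).foldl (fun m i => m.set i (List.replicate N false)) m0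
  (List.range N).foldl (fun m i =>
    let m := m.set i ((m.getD i []).set i false)
    let p := (List.range N).foldl (fun (p : List (List Bool) × Bool) offset =>
      let j := (i + offset) % N
      let m' := p.1.set i ((p.1.getD i []).set j p.2)
      (m', p.2 || is_cutpoint.getD j false)) (m, false)
    p.1) m1

-- ===== PORT B =====
-- Literal transliteration of B (Source B): prefix-count table P over the doubled list,
-- each cell is P[i+offset] - P[i] > 0.
def initialize_any_intervening_cutpoint_alt (is_cutpoint : List Bool) : List (List Bool) :=
  let N := is_cutpoint.length
  let P : List Int := (is_cutpoint ++ is_cutpoint).foldl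
    (fun acc b => acc ++ [acc.getLast! + (if b then 1 else 0)]) [0]
  (List.range N).foldl (fun out i =>
    let row := (List.range N).foldl (fun row offset =>
      row.set ((i + offset) % N) (decide (P.getD (i + offset) 0 - P.getD i 0 > 0)))
      (List.replicate N false)
    out ++ [row]) []

-- ===== PRECONDITION & SPEC =====
def Spec_initialize_any_intervening_cutpoint (is_cutpoint : List Bool) (out : List (List Bool)) : Prop := out = initialize_any_intervening_cutpoint_alt is_cutpoint
instance (is_cutpoint : List Bool) (out : List (List Bool)) : Decidable (Spec_initialize_any_intervening_cutpoint is_cutpoint out) := by unfold Spec_initialize_any_intervening_cutpoint; infer_instance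

-- ===== CLAIM (what is proved, stated in full; the proofs are below) =====
def Claim_equal_initialize_any_intervening_cutpoint : Prop := ∀ (is_cutpoint : List Bool), Dom_initialize_any_intervening_cutpoint is_cutpoint → Spec_initialize_any_intervening_cutpoint is_cutpoint (initialize_any_intervening_cutpoint is_cutpoint)

-- ===== LEMMAS AND PROOFS =====

-- proof-only abbreviations
def pvCnt : List Bool → Int
  | [] => 0
  | b :: l => (if b then 1 else 0) + pvCnt l

def pvExt (s : Int) : List Bool → List Int
  | [] => []
  | b :: l => (s + (if b then 1 else 0)) :: pvExt (s + (if b then 1 else 0)) l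

-- A's running boolean at step k of row i = any cutpoint among the previous offsets
def pvRow (cut : List Bool) (i : Nat) : List Bool :=
  (List.range cut.length).foldl
    (fun r k => r.set ((i + k) % cut.length)
      ((List.range k).any (fun k' => cut.getD ((i + k') % cut.length) false)))
    (List.replicate cut.length false)

theorem pv_getLast!_concat {A : List Int} {s : Int} : (A ++ [s]).getLast! = s := by
  induction A with
  | nil => rfl
  | cons a A ih =>
    rcases A with _ | ⟨b, B⟩ <;> simp_all [List.getLast!]

theorem pv_buildP (L : List Bool) : ∀ (A : List Int) (s : Int),
    L.foldl (fun acc b => acc ++ [acc.getLast! + (if b then 1 else 0)]) (A ++ [s])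
      = (A ++ [s]) ++ pvExt s L := by
  induction L with
  | nil => intro A s; simp [pvExt]
  | cons b L ih =>
    intro A s
    have h1 : (A ++ [s]) ++ [(A ++ [s]).getLast! + (if b then 1 else 0)]
        = (A ++ [s]) ++ [s + (if b then 1 else 0)] := by rw [pv_getLast!_concat]
    simp only [List.foldl_cons, h1]
    have := ih ((A ++ [s])) (s + (if b then 1 else 0))
    simp only [List.append_assoc] at this ⊢
    simpa [pvExt] using this

theorem pv_getD_ext (L : List Bool) : ∀ (s : Int) (m : Nat), m ≤ L.length →
    (s :: pvExt s L).getD m 0 = s + pvCnt (L.take m) := by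
  induction L with
  | nil =>
    intro s m hm
    have : m = 0 := by simpa using hm
    subst this; simp [pvCnt]
  | cons b L ih =>
    intro s m hm
    cases m with
    | zero => simp [pvCnt]
    | succ m =>
      have := ih (s + (if b then 1 else 0)) m (by simpa using hm)
      simp only [pvExt, List.getD_cons_succ, List.take_succ_cons, pvCnt]
      rw [this]; ring

theorem pv_Pval (L : List Bool) (m : Nat) (hm : m ≤ L.length) :
    (L.foldl (fun acc b => acc ++ [acc.getLast! + (if b then 1 else 0)]) [0]).getD m 0
      = pvCnt (L.take m) := by
  have h := pv_buildP L [] 0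
  simp only [List.nil_append] at h
  rw [h]
  have := pv_getD_ext L 0 m hm
  simpa using this

theorem pv_cnt_take_succ (L : List Bool) (m : Nat) (hm : m < L.length) :
    pvCnt (L.take (m + 1)) = pvCnt (L.take m) + (if L.getD m false then 1 else 0) := by
  induction L generalizing m with
  | nil => simp at hm
  | cons b L ih =>
    cases m with
    | zero => simp [pvCnt]
    | succ m =>
      simp only [List.take_succ_cons, pvCnt, List.getD_cons_succ]
      rw [ih m (by simpa using hm)]; ring

theorem pv_cnt_mono (L : List Bool) : ∀ (i k : Nat), i + k ≤ L.length →
    pvCnt (L.take i) ≤ pvCnt (L.take (i + k)) := by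
  intro i k
  induction k with
  | zero => simp
  | succ k ih =>
    intro h
    have h1 : i + k < L.length := by omega
    calc pvCnt (L.take i) ≤ pvCnt (L.take (i + k)) := ih (by omega)
      _ ≤ pvCnt (L.take (i + k + 1)) := by
          rw [pv_cnt_take_succ L (i + k) h1]; split <;> omega

theorem pv_seg_any (L : List Bool) (i : Nat) : ∀ (k : Nat), i + k ≤ L.length →
    decide (pvCnt (L.take (i + k)) - pvCnt (L.take i) > 0)
      = (List.range k).any (fun k' => L.getD (i + k') false) := by
  intro k
  induction k with
  | zero => simp
  | succ k ih =>
    intro h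
    have h1 : i + k < L.length := by omega
    have hmono := pv_cnt_mono L i k (by omega)
    rw [show i + (k + 1) = (i + k) + 1 from by omega, pv_cnt_take_succ L (i + k) h1,
        List.range_succ, List.any_append, ← ih (by omega)]
    cases hb : L.getD (i + k) false
    · simp only [List.any_cons, List.any_nil, hb, Bool.or_false]
      norm_num
    · simp only [List.any_cons, List.any_nil, hb]
      norm_num
      omega

theorem pv_D_getD (cut : List Bool) (i k : Nat) (hi : i < cut.length) (hk : k < cut.length) :
    (cut ++ cut).getD (i + k) false = cut.getD ((i + k) % cut.length) false := by
  by_cases h : i + k < cut.length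
  · rw [List.getD_append _ _ _ _ h, Nat.mod_eq_of_lt h]
  · have h2 : (i + k) % cut.length = i + k - cut.length := by
      rw [Nat.mod_eq_sub_mod (by omega), Nat.mod_eq_of_lt (by omega)]
    rw [List.getD_append_right _ _ _ _ (by omega), h2]

theorem pv_getD_set_self {α : Type} (l : List α) (i : Nat) (a d : α) (h : i < l.length) :
    (l.set i a).getD i d = a := by
  rw [List.getD_eq_getElem _ _ (by simpa using h), List.getElem_set_self]

theorem pv_set_getD_self {α : Type} (M : List α) (i : Nat) (d : α) (h : i < M.length) :
    M.set i (M.getD i d) = M := by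
  apply List.ext_getElem (by simp)
  intro j h1 h2
  rw [List.getElem_set]
  split
  · subst j; rw [List.getD_eq_getElem _ _ h]
  · rfl

-- the inner loop of A: the pair state decomposes (matrix part, running "or")
theorem pv_inner (cut : List Bool) (i : Nat) (M : List (List Bool)) : ∀ (t : Nat),
    (List.range t).foldl (fun (p : List (List Bool) × Bool) offset =>
        (p.1.set i ((p.1.getD i []).set ((i + offset) % cut.length) p.2),
         p.2 || cut.getD ((i + offset) % cut.length) false)) (M, false)
      = ((List.range t).foldl (fun mm k => mm.set i ((mm.getD i []).set ((i + k) % cut.length)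
            ((List.range k).any (fun k' => cut.getD ((i + k') % cut.length) false)))) M,
         (List.range t).any (fun k' => cut.getD ((i + k') % cut.length) false)) := by
  intro t
  induction t with
  | zero => simp
  | succ t ih =>
    rw [List.range_succ, List.foldl_append, List.foldl_append, ih, List.any_append]
    simp

-- a fold each of whose steps rewrites only row i collapses to a fold on that row
theorem pv_foldl_set_row {α : Type} (i : Nat) (f : List α → Nat → List α) :
    ∀ (L : List Nat) (M : List (List α)), i < M.length →
    L.foldl (fun mm k => mm.set i (f (mm.getD i []) k)) M
      = M.set i (L.foldl f (M.getD i [])) := by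
  intro L
  induction L with
  | nil =>
    intro M h
    simp only [List.foldl_nil]
    exact (pv_set_getD_self M i [] h).symm
  | cons k L ih =>
    intro M h
    simp only [List.foldl_cons]
    rw [ih _ (by simpa using h), pv_getD_set_self _ _ _ _ h, List.set_set]

theorem pv_foldl_set_length {α : Type} (v : α) : ∀ (L : List Nat) (M : List α),
    (L.foldl (fun m i => m.set i v) M).length = M.length := by
  intro L
  induction L with
  | nil => simp
  | cons k L ih => intro M; simp [ih]

theorem pv_getD_set {α : Type} (l : List α) (i j : Nat) (a d : α) :
    (l.set i a).getD j d = if i = j ∧ j < l.length then a else l.getD j d := by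
  simp only [List.getD_eq_getElem?_getD, List.getElem?_set]
  split_ifs with h1 h2 h3 h3 <;> simp_all

-- the first loop of A: [[ ]]*N with every row replaced by [False]*N
theorem pv_init_getD {α : Type} (v d : α) (M : List α) : ∀ (t : Nat) (j : Nat),
    ((List.range t).foldl (fun m i => m.set i v) M).getD j d
      = if j < t ∧ j < M.length then v else M.getD j d := by
  intro t
  induction t with
  | zero => simp
  | succ t ih =>
    intro j
    rw [List.range_succ, List.foldl_append]
    simp only [List.foldl_cons, List.foldl_nil]
    rw [pv_getD_set, pv_foldl_set_length, ih j]
    by_cases h1 : t = j <;> by_cases h2 : j < M.length <;>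
      by_cases h3 : j < t <;> simp [h1, h2, h3] <;> omega

theorem pv_init {v : List Bool} (N : Nat) :
    (List.range N).foldl (fun m i => m.set i v) (List.replicate N ([] : List Bool))
      = List.replicate N v := by
  apply List.ext_getElem
  · rw [pv_foldl_set_length]; simp
  · intro j h1 h2
    have hj : j < N := by simpa using h2
    have hl : j < ((List.range N).foldl (fun m i => m.set i v)
        (List.replicate N ([] : List Bool))).length := h1
    rw [← List.getD_eq_getElem _ v hl, pv_init_getD]
    simp [hj]

theorem pv_foldl_append_map {α : Type} (h : Nat → α) (L : List Nat) :
    ∀ (acc : List α), L.foldl (fun out i => out ++ [h i]) acc = acc ++ L.map h := by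
  induction L with
  | nil => simp
  | cons k L ih => intro acc; simp [ih]

theorem pv_foldl_congr {α β : Type} (L : List β) (f1 f2 : α → β → α) :
    ∀ (a : α), (∀ x ∈ L, ∀ acc, f1 acc x = f2 acc x) →
    L.foldl f1 a = L.foldl f2 a := by
  induction L with
  | nil => simp
  | cons k L ih =>
    intro a h
    simp only [List.foldl_cons]
    rw [h k (by simp)]
    exact ih _ (fun x hx acc => h x (by simp [hx]) acc)

theorem pv_any_congr {α : Type} (L : List α) (f1 f2 : α → Bool)
    (h : ∀ x ∈ L, f1 x = f2 x) : L.any f1 = L.any f2 := by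
  induction L with
  | nil => rfl
  | cons k L ih =>
    simp only [List.any_cons]
    rw [h k (by simp), ih (fun x hx => h x (by simp [hx]))]

-- the outer loop of A produces rows pvRow
theorem pv_outer (cut : List Bool) : ∀ (t : Nat), t ≤ cut.length →
    (List.range t).foldl (fun m i =>
        let m' := m.set i ((m.getD i []).set i false)
        ((List.range cut.length).foldl (fun (p : List (List Bool) × Bool) offset =>
          (p.1.set i ((p.1.getD i []).set ((i + offset) % cut.length) p.2),
           p.2 || cut.getD ((i + offset) % cut.length) false)) (m', false)).1)
      (List.replicate cut.length (List.replicate cut.length false))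
      = (List.range cut.length).map
          (fun i => if i < t then pvRow cut i else List.replicate cut.length false) := by
  intro t
  induction t with
  | zero =>
    intro _
    apply List.ext_getElem (by simp)
    intro j h1 h2
    simp
  | succ t ih =>
    intro ht
    have htN : t < cut.length := by omega
    rw [List.range_succ, List.foldl_append, ih (by omega)]
    simp only [List.foldl_cons, List.foldl_nil]
    set Mt := (List.range cut.length).map
      (fun i => if i < t then pvRow cut i else List.replicate cut.length false) with hMt
    have hlen : Mt.length = cut.length := by simp [hMt]
    have hrow : Mt.getD t [] = List.replicate cut.length false := by
      rw [List.getD_eq_getElem _ _ (by omega)]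
      simp [hMt]
    rw [pv_inner cut t (Mt.set t ((Mt.getD t []).set t false)) cut.length]
    simp only
    rw [pv_foldl_set_row t
        (fun r k => r.set ((t + k) % cut.length)
          ((List.range k).any (fun k' => cut.getD ((t + k') % cut.length) false)))
        (List.range cut.length) _ (by rw [List.length_set]; omega)]
    rw [List.set_set, pv_getD_set_self _ _ _ _ (by omega), hrow,
        List.set_replicate_self]
    apply List.ext_getElem (by simp [hlen])
    intro j h1 h2
    rw [List.getElem_set]
    have hj : j < cut.length := by simpa using h2
    by_cases h3 : t = j
    · subst h3
      simp [pvRow]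
    · simp only [hMt, List.getElem_map, List.getElem_range]
      have : (j < t) = (j < t + 1) := by
        by_cases h4 : j < t <;> simp [h4] <;> omega
      simp [h3, this]

-- B's cell value (prefix-count difference positive) equals A's running boolean
theorem pv_cell (cut : List Bool) (i k : Nat) (hi : i < cut.length) (hk : k < cut.length) :
    decide (((cut ++ cut).foldl
        (fun acc b => acc ++ [acc.getLast! + (if b then 1 else 0)]) ([0] : List Int)).getD (i + k) 0
      - ((cut ++ cut).foldl
        (fun acc b => acc ++ [acc.getLast! + (if b then 1 else 0)]) ([0] : List Int)).getD i 0 > 0)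
      = (List.range k).any (fun k' => cut.getD ((i + k') % cut.length) false) := by
  have hik : i + k ≤ (cut ++ cut).length := by simp; omega
  have hi2 : i ≤ (cut ++ cut).length := by simp; omega
  rw [pv_Pval (cut ++ cut) (i + k) hik, pv_Pval (cut ++ cut) i hi2,
      pv_seg_any (cut ++ cut) i k hik]
  apply pv_any_congr
  intro k' hk'
  have hk'2 : k' < cut.length := by have := List.mem_range.mp hk'; omega
  exact pv_D_getD cut i k' hi hk'2

theorem pv_rows_eq (cut : List Bool) (i : Nat) (hi : i < cut.length) :
    pvRow cut i
      = (List.range cut.length).foldl (fun row offset =>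
          row.set ((i + offset) % cut.length)
            (decide (((cut ++ cut).foldl
              (fun acc b => acc ++ [acc.getLast! + (if b then 1 else 0)]) ([0] : List Int)).getD (i + offset) 0
              - ((cut ++ cut).foldl
              (fun acc b => acc ++ [acc.getLast! + (if b then 1 else 0)]) ([0] : List Int)).getD i 0 > 0)))
          (List.replicate cut.length false) := by
  unfold pvRow
  apply pv_foldl_congr
  intro k hk acc
  have hk2 : k < cut.length := List.mem_range.mp hk
  rw [pv_cell cut i k hi hk2]

-- ===== VERDICT (by name: the statement is the Claim_ definition above) =====
theorem initialize_any_intervening_cutpoint_spec : Claim_equal_initialize_any_intervening_cutpoint := by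
  intro cut _
  unfold Spec_initialize_any_intervening_cutpoint
  unfold initialize_any_intervening_cutpoint initialize_any_intervening_cutpoint_alt
  simp only
  rw [pv_init, pv_outer cut cut.length (le_refl _), pv_foldl_append_map]
  simp only [List.nil_append]
  apply List.ext_getElem (by simp)
  intro j h1 h2
  have hj : j < cut.length := by simpa using h1
  simp only [List.getElem_map, List.getElem_range]
  rw [if_pos hj, pv_rows_eq cut j hj]
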